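-- pv_equiv track=rewrite | github.com/harry71019/24787-final-proj | decisionTree.py | get_attribute_cases
-- ===== SOURCE A (Python) =====
-- def get_attribute_cases(attribute):
--     cases = []
--     for row in attribute:
--         if(cases.count(row) == 0):
--             cases.append(row)
--         if(len(cases) == 2):
--             if(cases[0]<cases[1]):
--                 temp = cases[0]
--                 cases[0] = cases[1]
--                 cases[1] = temp
--             break
--     return cases
-- ===== SOURCE B (Python) =====
-- def get_attribute_cases(attribute):
--     uniq = list(dict.fromkeys(attribute))[:2]
--     return sorted(uniq, reverse=True)
-- ===== Notes on version B (the rewrite author's own statement) =====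
-- stated objective: idiomatic
-- what changed: Replaces A's accumulator loop with .count membership, in-place swap and break by three library-level stages: ordered dedup via dict.fromkeys, a [:2] slice, and sorted(reverse=True).
import Mathlib
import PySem

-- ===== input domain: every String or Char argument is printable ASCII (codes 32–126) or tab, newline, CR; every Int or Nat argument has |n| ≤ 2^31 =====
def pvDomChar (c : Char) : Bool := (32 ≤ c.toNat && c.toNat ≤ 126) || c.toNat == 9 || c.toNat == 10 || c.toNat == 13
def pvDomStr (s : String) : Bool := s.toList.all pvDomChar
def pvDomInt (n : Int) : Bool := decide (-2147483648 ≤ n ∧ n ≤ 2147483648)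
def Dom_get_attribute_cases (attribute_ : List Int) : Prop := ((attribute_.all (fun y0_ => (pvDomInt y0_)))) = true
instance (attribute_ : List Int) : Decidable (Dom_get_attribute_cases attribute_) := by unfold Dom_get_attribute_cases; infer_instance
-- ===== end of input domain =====

-- B replaces A's accumulator loop (.count membership, in-place swap, break) by three
-- library stages: ordered dedup (dict.fromkeys), a [:2] slice, sorted(reverse=True)
-- (objective: idiomatic).


-- ===== PORT A =====
-- A's for-loop with break: recursion over the rows carrying the `cases` accumulator.
def pvLoopA : List Int → List Int → List Int
  | [], cases => cases
  | row :: rest, cases =>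
    let cases := if PySem.List.count cases row == 0 then cases ++ [row] else cases
    if cases.length == 2 then
      if cases.getD 0 0 < cases.getD 1 0 then [cases.getD 1 0, cases.getD 0 0] else cases
    else pvLoopA rest cases

def get_attribute_cases (attribute_ : List Int) : List Int :=
  pvLoopA attribute_ []

-- ===== PORT B =====
-- Source B: uniq = list(dict.fromkeys(attribute))[:2]; return sorted(uniq, reverse=True)
def get_attribute_cases_alt (attribute_ : List Int) : List Int :=
  let uniq := PySem.List.slice (PySem.List.dedup attribute_) none (some 2)
  PySem.List.sorted uniq (fun x => x) true

-- ===== PRECONDITION & SPEC =====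
def Spec_get_attribute_cases (attribute_ : List Int) (out : List Int) : Prop := out = get_attribute_cases_alt attribute_
instance (attribute_ : List Int) (out : List Int) : Decidable (Spec_get_attribute_cases attribute_ out) := by unfold Spec_get_attribute_cases; infer_instance

-- ===== CLAIM (what is proved, stated in full; the proofs are below) =====
def Claim_equal_get_attribute_cases : Prop := ∀ (attribute_ : List Int), Dom_get_attribute_cases attribute_ → Spec_get_attribute_cases attribute_ (get_attribute_cases attribute_)

-- ===== LEMMAS AND PROOFS =====

-- proof-side bridge: the first row differing from `f`, as a ≤1-element list
def pvFirstDiff (f : Int) (rest : List Int) : List Int :=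
  (List.find? (fun r => r != f) rest).toList

-- A's loop, once cases = [f], returns the pair {f, first differing row} sorted descending
theorem pvLoopA_single (f : Int) (rest : List Int) :
    pvLoopA rest [f] =
      (match pvFirstDiff f rest with
       | [] => [f]
       | r :: _ => if f > r then [f, r] else [r, f]) := by
  induction rest with
  | nil => rfl
  | cons r rs ih =>
    by_cases h : r = f
    · subst h
      simpa [pvFirstDiff, pvLoopA, PySem.List.count] using ih
    · have hc : List.count r [f] = 0 := by
        simp [List.count_singleton]
        exact fun e => absurd e.symm h
      simp [pvLoopA, pvFirstDiff, PySem.List.count, hc, h]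
      rcases lt_trichotomy f r with hlt | heq | hgt
      · simp [hlt, not_lt_of_gt hlt]
      · exact absurd heq.symm h
      · simp [not_lt_of_gt hgt, hgt]

-- adding into a set only ever appends
theorem pvFoldlAdd_prefix (l : List Int) (acc : PySem.Set Int) :
    ∃ t, List.foldl PySem.Set.add acc l = acc ++ t := by
  induction l generalizing acc with
  | nil => exact ⟨[], by simp⟩
  | cons x xs ih =>
    by_cases h : PySem.Set.contains acc x
    · have hm : x ∈ acc := by simpa [PySem.Set.contains] using h
      have hadd : PySem.Set.add acc x = acc := by simp [PySem.Set.add, hm]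
      obtain ⟨t, ht⟩ := ih acc
      exact ⟨t, by rw [List.foldl_cons, hadd, ht]⟩
    · have hm : x ∉ acc := by simpa [PySem.Set.contains] using h
      have hadd : PySem.Set.add acc x = acc ++ [x] := by simp [PySem.Set.add, hm]
      obtain ⟨t, ht⟩ := ih (acc ++ [x])
      exact ⟨[x] ++ t, by rw [List.foldl_cons, hadd, ht]; simp⟩

-- the first two of the ordered dedup are `f` and the first differing row
theorem pvTake2_foldl (f : Int) (rest : List Int) :
    (List.foldl PySem.Set.add [f] rest).take 2 = f :: pvFirstDiff f rest := by
  induction rest with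
  | nil => rfl
  | cons r rs ih =>
    by_cases h : r = f
    · subst h
      simpa [pvFirstDiff, PySem.Set.add, PySem.Set.contains] using ih
    · have hadd : PySem.Set.add [f] r = [f, r] := by
        simp [PySem.Set.add, PySem.Set.contains, h]
      have hb : (r != f) = true := by simp [h]
      have hfind : List.find? (fun x => x != f) (r :: rs) = some r := by
        simp [List.find?, hb]
      obtain ⟨t, ht⟩ := pvFoldlAdd_prefix rs ([f, r] : PySem.Set Int)
      rw [List.foldl_cons, hadd, ht]
      simp [pvFirstDiff, hfind]
-- sorted(·, reverse=True) on the ≤2-element lists that occur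
theorem pvSortedDesc_single (f : Int) :
    PySem.List.sorted [f] (fun x => x) true = [f] := by
  apply PySem.List.sorted_rev_eq_of_perm_of_pairwise_gt <;> simp

theorem pvSortedDesc_pair (a b : Int) (h : b < a) :
    PySem.List.sorted [a, b] (fun x => x) true = [a, b] := by
  apply PySem.List.sorted_rev_eq_of_perm_of_pairwise_gt <;> simp [h]

theorem pvSortedDesc_pair_swap (a b : Int) (h : a < b) :
    PySem.List.sorted [a, b] (fun x => x) true = [b, a] := by
  apply PySem.List.sorted_rev_eq_of_perm_of_pairwise_gt
  · exact List.Perm.swap a b []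
  · simp [h]

-- ===== VERDICT (by name: the statement is the Claim_ definition above) =====
theorem get_attribute_cases_spec : Claim_equal_get_attribute_cases := by
  intro attribute_ _
  unfold Spec_get_attribute_cases get_attribute_cases get_attribute_cases_alt
  cases attribute_ with
  | nil =>
    simp [pvLoopA, PySem.List.dedup, PySem.List.slice]
    apply PySem.List.sorted_rev_eq_of_perm_of_pairwise_gt <;> simp
  | cons f rest =>
    have hA : pvLoopA (f :: rest) [] = pvLoopA rest [f] := by
      simp [pvLoopA, PySem.List.count]
    have hslice : PySem.List.slice (PySem.List.dedup (f :: rest)) none (some 2)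
        = (PySem.List.dedup (f :: rest)).take 2 := by
      have := PySem.List.slice_to_natCast (PySem.List.dedup (f :: rest)) 2
      simpa using this
    have hded : (PySem.List.dedup (f :: rest)).take 2 = f :: pvFirstDiff f rest := by
      have : PySem.List.dedup (f :: rest) = List.foldl PySem.Set.add [f] rest := by
        simp [PySem.List.dedup_eq_ofList, PySem.Set.ofList_eq_foldl, List.foldl,
          PySem.Set.add, PySem.Set.contains]
      rw [this, pvTake2_foldl]
    rw [hA, pvLoopA_single]
    simp only [hslice, hded]
    cases hfd : List.find? (fun x => x != f) rest with
    | none =>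
      simp [pvFirstDiff, hfd, pvSortedDesc_single]
    | some r =>
      have hne : r ≠ f := by simpa using List.find?_some hfd
      have hfd' : pvFirstDiff f rest = [r] := by simp [pvFirstDiff, hfd]
      rw [hfd']
      rcases lt_trichotomy f r with hlt | heq | hgt
      · rw [pvSortedDesc_pair_swap f r hlt]
        simp [not_lt_of_gt hlt]
      · exact absurd heq.symm hne
      · rw [pvSortedDesc_pair f r hgt]
        simp [hgt]
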